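-- pv_equiv track=rewrite | github.com/Shift34/Hamming | Hamming.py | checking_check_bits
-- ===== SOURCE A (Python) =====
-- def checking_check_bits(list_number):
--     n = 0
--     while 2 ** n < len(list_number):
--         n1 = 2 ** n
--         m = n1 - 1
--         while m < len(list_number):
--             if (m + n1) > len(list_number):
--                 for i in range(m, len(list_number)):
--                     list_number[n1 - 1] += list_number[i]
--             else:
--                 for i in range(m, m + n1):
--                     list_number[n1 - 1] += list_number[i]
--             m += 2 ** (n + 1)
--         list_number[n1 - 1] = list_number[n1 - 1] % 2
--         n += 1
--     return list_number
-- ===== SOURCE B (Python) =====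
-- def checking_check_bits(list_number):
--     s = 0
--     for i, v in enumerate(list_number):
--         if v % 2:
--             s ^= i + 1
--     n1 = 1
--     while n1 < len(list_number):
--         b = 1 if s & n1 else 0
--         list_number[n1 - 1] = (b + list_number[n1 - 1]) % 2
--         n1 *= 2
--     return list_number
-- ===== Notes on version B (the rewrite author's own statement) =====
-- stated objective: faster
-- what changed: Replaces A's per-check-bit passes that re-scan blocks of the list and accumulate sums in place by a single pass that XORs the 1-based index of every odd element into a syndrome, then sets each check bit from one bit of the syndrome (corrected for A's self-doubling of the check position).
import Mathlib
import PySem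

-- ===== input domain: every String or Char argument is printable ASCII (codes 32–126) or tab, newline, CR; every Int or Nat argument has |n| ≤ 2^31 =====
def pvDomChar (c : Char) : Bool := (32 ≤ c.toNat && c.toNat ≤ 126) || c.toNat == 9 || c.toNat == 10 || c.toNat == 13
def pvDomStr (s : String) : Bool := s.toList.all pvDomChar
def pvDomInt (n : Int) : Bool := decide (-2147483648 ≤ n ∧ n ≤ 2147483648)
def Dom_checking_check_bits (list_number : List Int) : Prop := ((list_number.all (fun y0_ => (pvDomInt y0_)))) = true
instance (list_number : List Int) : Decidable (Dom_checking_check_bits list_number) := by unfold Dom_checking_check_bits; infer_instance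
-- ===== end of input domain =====

-- B computes all Hamming check bits in one O(n) pass (XOR of 1-based indices of odd entries)
-- instead of A's per-check-bit block re-scans; both mutate the Python list in place (same mutation).

-- ===== PORT A =====
-- 'list_number[n1-1] += list_number[i]' (one step of A's inner for-loops)
def aStep (p : Nat) (acc : List Int) (i : Nat) : List Int :=
  acc.set p (acc.getD p 0 + acc.getD i 0)

-- A's inner 'while m < len(list_number)' loop; fuel bounds the iteration count
-- (m grows by 2^(n+1) ≥ 2 per iteration, so fuel = len suffices; at exhaustion both
-- the loop and the port have already stopped at the same state).
def aInner (n : Nat) (m : Nat) (l : List Int) (fuel : Nat) : List Int :=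
  match fuel with
  | 0 => l
  | fuel + 1 =>
    if m < l.length then
      let n1 := 2 ^ n
      let l' := if m + n1 > l.length
        then (List.range' m (l.length - m)).foldl (aStep (n1 - 1)) l
        else (List.range' m n1).foldl (aStep (n1 - 1)) l
      aInner n (m + 2 ^ (n + 1)) l' fuel
    else l

-- A's outer 'while 2 ** n < len(list_number)' loop (fuel = len suffices: 2^n ≥ n+1)
def aOuter (n : Nat) (l : List Int) (fuel : Nat) : List Int :=
  match fuel with
  | 0 => l
  | fuel + 1 =>
    if 2 ^ n < l.length then
      let n1 := 2 ^ n
      let l' := aInner n (n1 - 1) l l.length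
      aOuter (n + 1) (l'.set (n1 - 1) (PySem.Int.mod (l'.getD (n1 - 1) 0) 2)) fuel
    else l

def checking_check_bits (list_number : List Int) : List Int :=
  aOuter 0 list_number list_number.length

-- ===== PORT B =====
-- B's 'while n1 < len(list_number)' loop (n1 doubles, so fuel = len suffices)
def bLoop (s : Int) (n1 : Nat) (l : List Int) (fuel : Nat) : List Int :=
  match fuel with
  | 0 => l
  | fuel + 1 =>
    if n1 < l.length then
      let b : Int := if PySem.Int.band s (↑n1 : Int) ≠ 0 then 1 else 0
      bLoop s (n1 * 2) (l.set (n1 - 1) (PySem.Int.mod (b + l.getD (n1 - 1) 0) 2)) fuel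
    else l

def checking_check_bits_alt (list_number : List Int) : List Int :=
  let s : Int := (PySem.List.enumerate list_number).foldl
    (fun s iv => if PySem.Int.mod iv.2 2 ≠ 0 then PySem.Int.bxor s (iv.1 + 1) else s) 0
  bLoop s 1 list_number list_number.length

-- ===== PRECONDITION & SPEC =====
def Spec_checking_check_bits (list_number : List Int) (out : List Int) : Prop := out = checking_check_bits_alt list_number
instance (list_number : List Int) (out : List Int) : Decidable (Spec_checking_check_bits list_number out) := by unfold Spec_checking_check_bits; infer_instance

-- ===== CLAIM (what is proved, stated in full; the proofs are below) =====
def Claim_equal_checking_check_bits : Prop := ∀ (list_number : List Int), Dom_checking_check_bits list_number → Spec_checking_check_bits list_number (checking_check_bits list_number)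

-- ===== LEMMAS AND PROOFS =====

-- sum of the list entries at a list of indices (missing indices contribute 0)
def idxSum (l : List Int) (idxs : List Nat) : Int := (idxs.map (fun i => l.getD i 0)).sum

-- the indices visited by A's inner while-loop, block by block
def blocks (n1 m L fuel : Nat) : List Nat :=
  match fuel with
  | 0 => []
  | fuel + 1 =>
    if m < L then List.range' m (min n1 (L - m)) ++ blocks n1 (m + 2 * n1) L fuel else []

-- sum of the entries (indexed from k) whose index satisfies P
def sumPG (P : Nat → Bool) (k : Nat) (l : List Int) : Int :=
  match l with
  | [] => 0
  | v :: t => (if P k then v else 0) + sumPG P (k + 1) t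

-- Nat version of B's syndrome fold
def xorAux (l : List Int) (k : Nat) (s : Nat) : Nat :=
  match l with
  | [] => s
  | v :: t => xorAux t (k + 1) (if PySem.Int.mod v 2 ≠ 0 then s ^^^ (k + 1) else s)

theorem idxSum_nil (l : List Int) : idxSum l [] = 0 := rfl

theorem idxSum_cons (l : List Int) (i : Nat) (t : List Nat) :
    idxSum l (i :: t) = l.getD i 0 + idxSum l t := by
  simp [idxSum]

theorem idxSum_append (l : List Int) (a b : List Nat) :
    idxSum l (a ++ b) = idxSum l a + idxSum l b := by
  simp [idxSum]

theorem idxSum_congr (l1 l2 : List Int) (idxs : List Nat)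
    (h : ∀ i ∈ idxs, l1.getD i 0 = l2.getD i 0) : idxSum l1 idxs = idxSum l2 idxs := by
  unfold idxSum
  rw [List.map_congr_left h]

theorem getD_set_self (l : List Int) (p : Nat) (v : Int) (hp : p < l.length) :
    (l.set p v).getD p 0 = v := by
  simp [List.getD_eq_getElem?_getD, hp]

theorem getD_set_ne (l : List Int) (p i : Nat) (v : Int) (h : p ≠ i) :
    (l.set p v).getD i 0 = l.getD i 0 := by
  simp [List.getD_eq_getElem?_getD, List.getElem?_set_ne h]

theorem set_getD_self (l : List Int) (p : Nat) (hp : p < l.length) :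
    l.set p (l.getD p 0) = l := by
  have : l.getD p 0 = l[p] := by simp [List.getD_eq_getElem?_getD, List.getElem?_eq_getElem hp]
  rw [this, List.set_getElem_self]

theorem foldl_aStep (p : Nat) (idxs : List Nat) (l : List Int)
    (hp : ∀ i ∈ idxs, p < i) (hlen : p < l.length) :
    idxs.foldl (aStep p) l = l.set p (l.getD p 0 + idxSum l idxs) := by
  induction idxs generalizing l with
  | nil => rw [List.foldl_nil, idxSum_nil, add_zero, set_getD_self l p hlen]
  | cons i t ih =>
    have hpi : p < i := hp i (List.mem_cons_self)
    have hpt : ∀ j ∈ t, p < j := fun j hj => hp j (List.mem_cons_of_mem _ hj)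
    rw [List.foldl_cons]
    have hstep : aStep p l i = l.set p (l.getD p 0 + l.getD i 0) := rfl
    rw [hstep, ih _ hpt (by simpa using hlen), List.set_set,
        getD_set_self _ _ _ hlen,
        idxSum_congr _ l t (fun j hj => getD_set_ne _ _ _ _ (Nat.ne_of_lt (hpt j hj))),
        idxSum_cons]
    ring_nf

theorem blocks_mem_le (n1 L : Nat) : ∀ fuel m i, i ∈ blocks n1 m L fuel → m ≤ i := by
  intro fuel
  induction fuel with
  | zero => intro m i h; simp [blocks] at h
  | succ fuel ih =>
    intro m i h
    unfold blocks at h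
    by_cases hm : m < L
    · simp only [if_pos hm, List.mem_append] at h
      rcases h with h | h
      · exact (List.mem_range'_1.1 h).1
      · have := ih _ _ h; omega
    · simp [if_neg hm] at h

theorem blocks_of_ge (n1 m L fuel : Nat) (h : L ≤ m) : blocks n1 m L fuel = [] := by
  cases fuel <;> simp [blocks, Nat.not_lt.2 h]

theorem aInner_run (n : Nat) :
    ∀ fuel m (l : List Int), 2 ^ n - 1 < l.length → 2 ^ n - 1 < m →
      aInner n m l fuel
        = l.set (2 ^ n - 1) (l.getD (2 ^ n - 1) 0 + idxSum l (blocks (2 ^ n) m l.length fuel)) := by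
  intro fuel
  induction fuel with
  | zero =>
    intro m l hlen hm
    rw [aInner, blocks, idxSum_nil, add_zero, set_getD_self _ _ hlen]
  | succ fuel ih =>
    intro m l hlen hm
    rw [aInner, blocks]
    by_cases hmL : m < l.length
    · simp only [if_pos hmL]
      have hrange : (if m + 2 ^ n > l.length
            then (List.range' m (l.length - m)).foldl (aStep (2 ^ n - 1)) l
            else (List.range' m (2 ^ n)).foldl (aStep (2 ^ n - 1)) l)
          = (List.range' m (min (2 ^ n) (l.length - m))).foldl (aStep (2 ^ n - 1)) l := by
        split_ifs with h
        · congr 1; congr 1; omega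
        · congr 1; congr 1; omega
      rw [hrange, foldl_aStep _ _ _ (fun i hi => by
            have := (List.mem_range'_1.1 hi).1; omega) hlen]
      set S1 := idxSum l (List.range' m (min (2 ^ n) (l.length - m))) with hS1
      set l1 := l.set (2 ^ n - 1) (l.getD (2 ^ n - 1) 0 + S1) with hl1
      have hlen1 : l1.length = l.length := by simp [hl1]
      have h2 : 2 ^ (n + 1) = 2 * 2 ^ n := by rw [pow_succ]; ring
      rw [ih (m + 2 ^ (n + 1)) l1 (by omega) (by omega), hlen1]
      have hblk : idxSum l1 (blocks (2 ^ n) (m + 2 ^ (n + 1)) l.length fuel)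
          = idxSum l (blocks (2 ^ n) (m + 2 ^ (n + 1)) l.length fuel) := by
        refine idxSum_congr _ _ _ (fun j hj => ?_)
        have := blocks_mem_le (2 ^ n) l.length fuel _ j hj
        exact getD_set_ne _ _ _ _ (by omega)
      rw [hblk, hl1, List.set_set, getD_set_self _ _ _ hlen, h2, idxSum_append]
      congr 1
      ring
    · simp only [if_neg hmL]
      rw [idxSum_nil, add_zero, set_getD_self _ _ hlen]

theorem aInner_pass (n : Nat) (fuel : Nat) (l : List Int) (h : 2 ^ n < l.length) :
    aInner n (2 ^ n - 1) l fuel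
      = l.set (2 ^ n - 1)
          (l.getD (2 ^ n - 1) 0 + idxSum l (blocks (2 ^ n) (2 ^ n - 1) l.length fuel)) := by
  have hp : 2 ^ n - 1 < l.length := by have := Nat.one_le_two_pow (n := n); omega
  cases fuel with
  | zero => rw [aInner, blocks, idxSum_nil, add_zero, set_getD_self _ _ hp]
  | succ fuel =>
    rw [aInner, blocks]
    simp only [if_pos hp]
    have h1 : 1 ≤ 2 ^ n := Nat.one_le_two_pow
    have hrange : (if 2 ^ n - 1 + 2 ^ n > l.length
          then (List.range' (2 ^ n - 1) (l.length - (2 ^ n - 1))).foldl (aStep (2 ^ n - 1)) l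
          else (List.range' (2 ^ n - 1) (2 ^ n)).foldl (aStep (2 ^ n - 1)) l)
        = (List.range' (2 ^ n - 1) (min (2 ^ n) (l.length - (2 ^ n - 1)))).foldl
            (aStep (2 ^ n - 1)) l := by
      split_ifs with h'
      · congr 1; congr 1; omega
      · congr 1; congr 1; omega
    obtain ⟨c, hc⟩ : ∃ c, min (2 ^ n) (l.length - (2 ^ n - 1)) = c + 1 := by
      refine ⟨min (2 ^ n) (l.length - (2 ^ n - 1)) - 1, ?_⟩; omega
    rw [hrange, hc, List.range'_succ, List.foldl_cons]
    have hstep : aStep (2 ^ n - 1) l (2 ^ n - 1)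
        = l.set (2 ^ n - 1) (l.getD (2 ^ n - 1) 0 + l.getD (2 ^ n - 1) 0) := rfl
    rw [hstep, foldl_aStep _ _ _ (fun i hi => by
          have := (List.mem_range'_1.1 hi).1; omega) (by simpa using hp)]
    set x := l.getD (2 ^ n - 1) 0 with hx
    set rest := List.range' (2 ^ n - 1 + 1) c with hrest
    have hrest_gt : ∀ j ∈ rest, 2 ^ n - 1 < j := by
      intro j hj; have := (List.mem_range'_1.1 hj).1; omega
    set l1 := l.set (2 ^ n - 1) (x + x) with hl1
    have hlen1 : l1.length = l.length := by simp [hl1]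
    have hrw1 : idxSum l1 rest = idxSum l rest :=
      idxSum_congr _ _ _ (fun j hj => getD_set_ne _ _ _ _ (by have := hrest_gt j hj; omega))
    set l2 := l1.set (2 ^ n - 1) (l1.getD (2 ^ n - 1) 0 + idxSum l1 rest) with hl2
    have hlen2 : l2.length = l.length := by simp [hl2, hl1]
    rw [aInner_run n fuel _ l2 (by omega) (by omega), hlen2]
    have h2 : 2 ^ (n + 1) = 2 * 2 ^ n := by rw [pow_succ]; ring
    have hl2' : l2 = l.set (2 ^ n - 1) (x + x + idxSum l rest) := by
      rw [hl2, hl1, List.set_set, getD_set_self _ _ _ hp, hrw1]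
    have hrw2 : idxSum l2 (blocks (2 ^ n) (2 ^ n - 1 + 2 ^ (n + 1)) l.length fuel)
        = idxSum l (blocks (2 ^ n) (2 ^ n - 1 + 2 ^ (n + 1)) l.length fuel) := by
      refine idxSum_congr _ _ _ (fun j hj => ?_)
      have := blocks_mem_le (2 ^ n) l.length fuel _ j hj
      rw [hl2']
      exact getD_set_ne _ _ _ _ (by omega)
    rw [hrw2, hl2', List.set_set, getD_set_self _ _ _ hp, h2, List.cons_append, idxSum_cons, idxSum_append]
    congr 1
    ring

theorem testBit_iff_mod (x n : Nat) : x.testBit n = decide (2 ^ n ≤ x % 2 ^ (n + 1)) := by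
  rw [Nat.testBit_eq_decide_div_mod_eq]
  have hpos : 0 < 2 ^ n := Nat.two_pow_pos n
  have h : x % 2 ^ (n + 1) = x % 2 ^ n + 2 ^ n * (x / 2 ^ n % 2) := by
    rw [pow_succ, Nat.mod_mul]
  have h2 : x % 2 ^ n < 2 ^ n := Nat.mod_lt _ hpos
  have hb : x / 2 ^ n % 2 = 0 ∨ x / 2 ^ n % 2 = 1 := by omega
  rcases hb with hb | hb <;> rw [hb] at h ⊢ <;> simp <;> omega

theorem blocks_eq_filter (n : Nat) (L : Nat) :
    ∀ fuel m, L ≤ m + fuel → m % (2 ^ (n + 1)) = 2 ^ n - 1 →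
      blocks (2 ^ n) m L fuel
        = (List.range' m (L - m)).filter (fun i => (i + 1).testBit n) := by
  intro fuel
  induction fuel with
  | zero =>
    intro m hf hm
    have : L - m = 0 := by omega
    rw [blocks, this]
    simp
  | succ fuel ih =>
    intro m hf hm
    have hN1 : 1 ≤ 2 ^ n := Nat.one_le_two_pow
    have hN2 : 2 ^ (n + 1) = 2 * 2 ^ n := by rw [pow_succ]; ring
    have hmod := Nat.div_add_mod m (2 ^ (n + 1))
    set Q := 2 ^ (n + 1) * (m / 2 ^ (n + 1)) with hQ
    have hQmod : ∀ a : Nat, (a + Q) % 2 ^ (n + 1) = a % 2 ^ (n + 1) := by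
      intro a; rw [hQ, Nat.add_mul_mod_self_left]
    have key1 : ∀ i, m ≤ i → i < m + 2 ^ n → (i + 1).testBit n = true := by
      intro i hi1 hi2
      rw [testBit_iff_mod]
      have he : i + 1 = (2 ^ n + (i - m)) + Q := by omega
      rw [he, hQmod, Nat.mod_eq_of_lt (by omega)]
      simp
    have key2 : ∀ i, m + 2 ^ n ≤ i → i < m + 2 ^ (n + 1) → (i + 1).testBit n = false := by
      intro i hi1 hi2
      rw [testBit_iff_mod]
      have he : i + 1 = (i - m - 2 ^ n) + (Q + 2 ^ (n + 1)) := by omega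
      have : (i + 1) % 2 ^ (n + 1) = (i - m - 2 ^ n) % 2 ^ (n + 1) := by
        rw [he, ← Nat.add_assoc]
        rw [Nat.add_mod_right, hQmod]
      rw [this, Nat.mod_eq_of_lt (by omega)]
      simp
      omega
    rw [blocks]
    by_cases hmL : m < L
    · simp only [if_pos hmL]
      by_cases h1 : L ≤ m + 2 ^ n
      · have hmin : min (2 ^ n) (L - m) = L - m := by omega
        rw [hmin, blocks_of_ge _ _ _ _ (by omega)]
        rw [List.filter_eq_self.2 (fun i hi => by
          have := List.mem_range'_1.1 hi
          exact key1 i this.1 (by omega))]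
        simp
      · have hmin : min (2 ^ n) (L - m) = 2 ^ n := by omega
        rw [hmin]
        by_cases h2 : L ≤ m + 2 ^ (n + 1)
        · rw [blocks_of_ge _ _ _ _ (by omega)]
          have hsplit : List.range' m (L - m) = List.range' m (2 ^ n) ++ List.range' (m + 2 ^ n) (L - m - 2 ^ n) := by
            rw [List.range'_append_1]
            congr 1
            omega
          rw [hsplit, List.filter_append]
          rw [List.filter_eq_self.2 (fun i hi => by
            have := List.mem_range'_1.1 hi
            exact key1 i this.1 (by omega))]
          rw [List.filter_eq_nil_iff.2 (fun i hi => by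
            have := List.mem_range'_1.1 hi
            simp [key2 i this.1 (by omega)])]
        · have h4 : m + 2 ^ n + 2 ^ n = m + 2 ^ (n + 1) := by omega
          have hsplit : List.range' m (L - m)
              = List.range' m (2 ^ n) ++ (List.range' (m + 2 ^ n) (2 ^ n)
                  ++ List.range' (m + 2 ^ n + 2 ^ n) (L - (m + 2 ^ n + 2 ^ n))) := by
            rw [List.range'_append_1, List.range'_append_1]
            congr 1
            omega
          rw [hsplit, List.filter_append, List.filter_append]
          rw [List.filter_eq_self.2 (fun i hi => by
            have := List.mem_range'_1.1 hi
            exact key1 i this.1 (by omega))]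
          rw [List.filter_eq_nil_iff.2 (fun i hi => by
            have := List.mem_range'_1.1 hi
            simp [key2 i this.1 (by omega)])]
          have e := ih (m + 2 * 2 ^ n) (by omega) (by
            have h5 : m + 2 * 2 ^ n = m + 2 ^ (n + 1) := by omega
            rw [h5, Nat.add_mod_right]
            exact hm)
          rw [e, h4]
          have h6 : m + 2 * 2 ^ n = m + 2 ^ (n + 1) := by omega
          rw [h6]
          have h7 : L - (m + 2 ^ (n + 1)) = L - m - 2 ^ (n + 1) := by omega
          rw [h7]
          simp
    · simp only [if_neg hmL]
      have : L - m = 0 := by omega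
      rw [this]
      simp

theorem idxSum_filter (l0 : List Int) (P : Nat → Bool) :
    ∀ (t : List Int) k, l0.drop k = t →
      idxSum l0 ((List.range' k (l0.length - k)).filter P) = sumPG P k t := by
  intro t
  induction t with
  | nil =>
    intro k h
    have hk : l0.length ≤ k := by
      have := List.drop_eq_nil_iff.1 h
      omega
    have : l0.length - k = 0 := by omega
    rw [this]
    simp [sumPG, idxSum]
  | cons v t ih =>
    intro k h
    have hk : k < l0.length := by
      by_contra hk
      rw [List.drop_eq_nil_iff.2 (by omega)] at h
      simp at h
    have hv : l0[k]? = some v := by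
      have h0 : (l0.drop k)[0]? = some v := by rw [h]; rfl
      rwa [List.getElem?_drop, Nat.add_zero] at h0
    have hgd : l0.getD k 0 = v := by
      rw [List.getD_eq_getElem?_getD, hv]; rfl
    have hdrop : l0.drop (k + 1) = t := by
      have : l0.drop (k + 1) = (l0.drop k).drop 1 := by
        rw [List.drop_drop]
      rw [this, h, List.drop_one, List.tail_cons]
    obtain ⟨j, hj⟩ : ∃ j, l0.length - k = j + 1 := ⟨l0.length - k - 1, by omega⟩
    have hj2 : l0.length - (k + 1) = j := by omega
    rw [hj, List.range'_succ, List.filter_cons]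
    by_cases hP : P k
    · simp only [hP, if_true]
      rw [idxSum_cons, hgd, show j = l0.length - (k + 1) from hj2.symm, ih (k + 1) hdrop]
      simp [sumPG, hP]
    · simp only [hP, Bool.false_eq_true, if_false]
      rw [show j = l0.length - (k + 1) from hj2.symm, ih (k + 1) hdrop]
      simp [sumPG, hP]

theorem enum_fold_eq :
    ∀ (l : List Int) (k s : Nat),
      (PySem.List.enumerate l (↑k : Int)).foldl
          (fun s iv => if PySem.Int.mod iv.2 2 ≠ 0 then PySem.Int.bxor s (iv.1 + 1) else s)
          (↑s : Int)
        = ↑(xorAux l k s) := by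
  intro l
  induction l with
  | nil => intro k s; simp [PySem.List.enumerate_nil, xorAux]
  | cons v t ih =>
    intro k s
    rw [PySem.List.enumerate_cons, List.foldl_cons, xorAux]
    have h1 : ((k : Int) + 1) = ((k + 1 : Nat) : Int) := by push_cast; ring
    by_cases hv : PySem.Int.mod v 2 ≠ 0
    · rw [if_pos hv, if_pos hv, h1, PySem.Int.bxor_natCast]
      exact ih (k + 1) (s ^^^ (k + 1))
    · rw [if_neg hv, if_neg hv, h1]
      exact ih (k + 1) s

theorem xorAux_testBit (n : Nat) :
    ∀ (l : List Int) (k s : Nat),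
      (xorAux l k s).testBit n
        = Bool.xor (s.testBit n)
            (decide (sumPG (fun i => (i + 1).testBit n) k l % 2 = 1)) := by
  intro l
  induction l with
  | nil => intro k s; simp [xorAux, sumPG]
  | cons v t ih =>
    intro k s
    rw [xorAux, ih]
    simp only [sumPG]
    set S := sumPG (fun i => (i + 1).testBit n) (k + 1) t with hS
    have hm2 : PySem.Int.mod v 2 = v % 2 := PySem.Int.mod_eq_emod_of_pos (by norm_num)
    have hS2 := Int.emod_two_eq S
    by_cases hv : v % 2 = 0
    · rw [if_neg (by rw [hm2]; omega)]
      congr 1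
      rw [decide_eq_decide]
      by_cases hb : (k + 1).testBit n
      · rw [if_pos hb]; omega
      · rw [if_neg hb]; omega
    · rw [if_pos (by rw [hm2]; omega)]
      have hv2 := Int.emod_two_eq v
      rw [Nat.testBit_xor]
      by_cases hb : (k + 1).testBit n
      · simp only [hb, if_true]
        have hflip : decide ((v + S) % 2 = 1) = !decide (S % 2 = 1) := by
          by_cases hd : S % 2 = 1
          · have h0 : ¬ ((v + S) % 2 = 1) := by omega
            simp [hd, h0]
          · have h1 : (v + S) % 2 = 1 := by omega
            simp [hd, h1]
        rw [hflip]
        cases s.testBit n <;> cases hd : decide (S % 2 = 1) <;> simp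
      · have hb' : (k + 1).testBit n = false := by simp [hb]
        simp only [hb', Bool.false_eq_true, if_false, Bool.xor_false, zero_add]

theorem outer_eq (orig : List Int) (s : Int) (hs : s = ↑(xorAux orig 0 0)) :
    ∀ fuel n (cur : List Int), cur.length = orig.length →
      (∀ i : Nat, (∀ k, k < n → i ≠ 2 ^ k - 1) → cur.getD i 0 = orig.getD i 0) →
      aOuter n cur fuel = bLoop s (2 ^ n) cur fuel := by
  intro fuel
  induction fuel with
  | zero => intro n cur _ _; rfl
  | succ fuel ih =>
    intro n cur hlen hinv
    rw [aOuter, bLoop]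
    by_cases hg : 2 ^ n < cur.length
    · simp only [if_pos hg]
      have hN1 : 1 ≤ 2 ^ n := Nat.one_le_two_pow
      have hp : 2 ^ n - 1 < cur.length := by omega
      rw [aInner_pass n cur.length cur hg, getD_set_self _ _ _ hp, List.set_set]
      have hval : PySem.Int.mod
            (cur.getD (2 ^ n - 1) 0 + idxSum cur (blocks (2 ^ n) (2 ^ n - 1) cur.length cur.length)) 2
          = PySem.Int.mod
            ((if PySem.Int.band s (↑(2 ^ n : Nat) : Int) ≠ 0 then (1:Int) else 0)
              + cur.getD (2 ^ n - 1) 0) 2 := by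
        have hmodpos : ∀ a : Int, PySem.Int.mod a 2 = a % 2 :=
          fun a => PySem.Int.mod_eq_emod_of_pos (by norm_num)
        have hpow : 2 ^ n < 2 ^ (n + 1) := by rw [pow_succ]; omega
        have hblocks := blocks_eq_filter n cur.length cur.length (2 ^ n - 1)
          (by omega) (Nat.mod_eq_of_lt (by omega))
        rw [hblocks]
        set P : Nat → Bool := fun i => (i + 1).testBit n with hP
        have hcong : idxSum cur ((List.range' (2 ^ n - 1) (cur.length - (2 ^ n - 1))).filter P)
            = idxSum orig ((List.range' (2 ^ n - 1) (cur.length - (2 ^ n - 1))).filter P) := by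
          refine idxSum_congr _ _ _ (fun i hi => ?_)
          have hPi : P i = true := List.of_mem_filter hi
          refine hinv i (fun k hk hik => ?_)
          rw [hP] at hPi
          simp only [hik] at hPi
          have h1k : 1 ≤ 2 ^ k := Nat.one_le_two_pow
          rw [show 2 ^ k - 1 + 1 = 2 ^ k by omega, Nat.testBit_two_pow] at hPi
          simp at hPi
          omega
        rw [hcong]
        have hlow : (List.range' 0 (2 ^ n - 1)).filter P = [] := by
          refine List.filter_eq_nil_iff.2 (fun i hi => ?_)
          have := List.mem_range'_1.1 hi
          simp [hP, Nat.testBit_eq_false_of_lt (show i + 1 < 2 ^ n by omega)]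
        have hjoin : (List.range' 0 cur.length).filter P
            = ((List.range' (2 ^ n - 1) (cur.length - (2 ^ n - 1))).filter P) := by
          have : List.range' 0 cur.length
              = List.range' 0 (2 ^ n - 1) ++ List.range' (2 ^ n - 1) (cur.length - (2 ^ n - 1)) := by
            have := List.range'_append_1 (s := 0) (m := 2 ^ n - 1)
              (n := cur.length - (2 ^ n - 1))
            rw [Nat.zero_add] at this
            rw [this]
            congr 1
            omega
          rw [this, List.filter_append, hlow, List.nil_append]
        rw [← hjoin, hlen]
        have hsum := idxSum_filter orig P orig 0 rfl
        rw [Nat.sub_zero] at hsum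
        rw [hsum]
        have hbit := xorAux_testBit n orig 0 0
        rw [Nat.zero_testBit, Bool.false_xor] at hbit
        rw [← hP] at hbit
        have hand := Nat.and_two_pow (xorAux orig 0 0) n
        have hS2 := Int.emod_two_eq (sumPG P 0 orig)
        cases htb : (xorAux orig 0 0).testBit n with
        | true =>
          have hS1 : sumPG P 0 orig % 2 = 1 := by
            rw [htb] at hbit
            exact of_decide_eq_true hbit.symm
          have hcond : PySem.Int.band s (↑(2 ^ n : Nat) : Int) ≠ 0 := by
            rw [hs, PySem.Int.band_natCast, hand, htb]
            simp
          rw [if_pos hcond, hmodpos, hmodpos]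
          omega
        | false =>
          have hS1 : sumPG P 0 orig % 2 = 0 := by
            rw [htb] at hbit
            have := of_decide_eq_false hbit.symm
            omega
          have hcond : ¬ (PySem.Int.band s (↑(2 ^ n : Nat) : Int) ≠ 0) := by
            rw [hs, PySem.Int.band_natCast, hand, htb]
            simp
          rw [if_neg hcond, hmodpos, hmodpos]
          omega
      rw [hval]
      have h2 : 2 ^ n * 2 = 2 ^ (n + 1) := by rw [pow_succ]
      rw [h2]
      refine ih (n + 1) _ (by simpa using hlen) ?_
      intro i hi
      have hip : (2 ^ n - 1) ≠ i := fun he => hi n (Nat.lt_succ_self n) he.symm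
      rw [getD_set_ne _ _ _ _ hip]
      exact hinv i (fun k hk => hi k (Nat.lt_succ_of_lt hk))
    · simp only [if_neg hg]

-- ===== VERDICT (by name: the statement is the Claim_ definition above) =====
theorem checking_check_bits_spec : Claim_equal_checking_check_bits := by
  intro l _hd
  show checking_check_bits l = checking_check_bits_alt l
  unfold checking_check_bits checking_check_bits_alt
  have hs := enum_fold_eq l 0 0
  simp only [Nat.cast_zero] at hs
  rw [hs]
  have := outer_eq l (↑(xorAux l 0 0)) rfl l.length 0 l rfl (fun i _ => rfl)
  simpa using this
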